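-- pv_equiv track=rewrite | github.com/manasa-alla05/Disaster-Relief-coordination-system | preprocessing/preprocessor.py | _replace_emoticons
-- ===== SOURCE A (Python) =====
-- def _replace_emoticons(text):
--     # Basic emoticon replacement (can be expanded)
--     emoticon_map = {
--         ":)": "smiling face",
--         ":(": "sad face",
--         "<3": "heart",
--         ":D": "big smile",
--         ";)": "winking face"
--     }
--     for emoticon, replacement in emoticon_map.items():
--         text = text.replace(emoticon, replacement)
--     return text
-- ===== SOURCE B (Python) =====
-- def _replace_emoticons(text):
--     # Basic emoticon replacement (can be expanded)
--     emoticon_map = {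
--         ":)": "smiling face",
--         ":(": "sad face",
--         "<3": "heart",
--         ":D": "big smile",
--         ";)": "winking face"
--     }
--     out = []
--     i = 0
--     n = len(text)
--     while i < n:
--         rep = emoticon_map.get(text[i:i+2])
--         if rep is not None:
--             out.append(rep)
--             i += 2
--         else:
--             out.append(text[i])
--             i += 1
--     return "".join(out)
-- ===== Notes on version B (the rewrite author's own statement) =====
-- stated objective: alternative
-- what changed: Replaced the five sequential full-text str.replace passes with a single left-to-right scan that looks the 2-character window text[i:i+2] up in the emoticon dict, emitting the replacement and advancing by 2 on a hit (sound because no replacement contains an emoticon and no two emoticons can overlap).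
import Mathlib
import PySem

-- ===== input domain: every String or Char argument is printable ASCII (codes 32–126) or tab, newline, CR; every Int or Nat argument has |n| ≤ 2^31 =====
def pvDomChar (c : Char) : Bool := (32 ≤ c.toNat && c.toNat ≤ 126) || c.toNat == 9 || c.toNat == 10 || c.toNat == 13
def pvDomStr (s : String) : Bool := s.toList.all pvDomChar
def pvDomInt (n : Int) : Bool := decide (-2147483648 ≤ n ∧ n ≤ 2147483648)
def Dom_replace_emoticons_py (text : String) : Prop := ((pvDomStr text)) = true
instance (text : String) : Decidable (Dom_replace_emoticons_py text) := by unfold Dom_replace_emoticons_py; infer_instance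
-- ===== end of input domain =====

-- B replaces A's five sequential full-text `str.replace` passes by one left-to-right
-- scan with a dict lookup on the 2-char window (objective: alternative single-pass algorithm).

-- ===== PORT A =====
-- the dict items, in insertion order, as A's loop visits them
def pvReplA : List (String × String) :=
  [(":)", "smiling face"), (":(", "sad face"), ("<3", "heart"),
   (":D", "big smile"), (";)", "winking face")]

def replace_emoticons_py (text : String) : String :=
  pvReplA.foldl (fun t p => PySem.Str.replace t p.1 p.2) text

-- ===== PORT B =====
-- Source B's emoticon_map, keys/values as char lists (the scan works on the char level)
def pvEmoRules : List (List Char × List Char) :=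
  [([':', ')'], ['s','m','i','l','i','n','g',' ','f','a','c','e']),
   ([':', '('], ['s','a','d',' ','f','a','c','e']),
   (['<', '3'], ['h','e','a','r','t']),
   ([':', 'D'], ['b','i','g',' ','s','m','i','l','e']),
   ([';', ')'], ['w','i','n','k','i','n','g',' ','f','a','c','e'])]

-- Source B's while-loop: look the 2-char window text[i:i+2] up; on a hit emit the
-- replacement and advance by 2, otherwise emit the character and advance by 1
def pvScan (R : List (List Char × List Char)) : List Char → List Char
  | [] => []
  | [c] =>
    match List.lookup [c] R with
    | some v => v
    | none => [c]
  | c1 :: c2 :: t =>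
    match List.lookup [c1, c2] R with
    | some v => v ++ pvScan R t
    | none => c1 :: pvScan R (c2 :: t)

def replace_emoticons_py_alt (text : String) : String :=
  String.ofList (pvScan pvEmoRules text.toList)

-- ===== PRECONDITION & SPEC =====
def Spec_replace_emoticons_py (text : String) (out : String) : Prop := out = replace_emoticons_py_alt text
instance (text : String) (out : String) : Decidable (Spec_replace_emoticons_py text out) := by unfold Spec_replace_emoticons_py; infer_instance

-- ===== CLAIM (what is proved, stated in full; the proofs are below) =====
def Claim_equal_replace_emoticons_py : Prop := ∀ (text : String), Dom_replace_emoticons_py text → Spec_replace_emoticons_py text (replace_emoticons_py text)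

-- ===== LEMMAS AND PROOFS =====

-- proof-side single-pattern scanner: what one `str.replace` pass with a 2-char pattern does
def pvSc (a b : Char) (r : List Char) : List Char → List Char
  | [] => []
  | [c] => [c]
  | c1 :: c2 :: t =>
    if c1 = a ∧ c2 = b then r ++ pvSc a b r t else c1 :: pvSc a b r (c2 :: t)

theorem pvSc_cons_ne (a b c : Char) (r y : List Char) (h : c ≠ a) :
    pvSc a b r (c :: y) = c :: pvSc a b r y := by
  cases y with
  | nil => rfl
  | cons d t => simp [pvSc, h]

theorem pvSc_append_not_mem (a b : Char) (r l x : List Char) (h : a ∉ l) :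
    pvSc a b r (l ++ x) = l ++ pvSc a b r x := by
  induction l with
  | nil => simp
  | cons c l ih =>
    have hc : c ≠ a := fun hEq => h (by simp [hEq])
    have hl : a ∉ l := fun hm => h (by simp [hm])
    simp only [List.cons_append, pvSc_cons_ne a b c r (l ++ x) hc, ih hl]

theorem pvSc_match (a b : Char) (r t : List Char) :
    pvSc a b r (a :: b :: t) = r ++ pvSc a b r t := by
  simp [pvSc]

theorem pvSc_no_match (a b c1 c2 : Char) (r t : List Char) (h : ¬(c1 = a ∧ c2 = b)) :
    pvSc a b r (c1 :: c2 :: t) = c1 :: pvSc a b r (c2 :: t) := by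
  simp [pvSc, h]

-- `replace.go` with enough fuel is exactly the single-pattern scanner
theorem pvReplaceGo_eq (a b : Char) (r : List Char) :
    ∀ (fuel : Nat) (l acc : List Char), l.length ≤ fuel →
      PySem.Chars.replace.go [a, b] r fuel l acc = acc.reverse ++ pvSc a b r l := by
  intro fuel
  induction fuel with
  | zero =>
    intro l acc h
    have : l = [] := List.eq_nil_of_length_eq_zero (Nat.le_zero.mp h)
    subst this
    simp [PySem.Chars.replace.go, pvSc]
  | succ n ih =>
    intro l acc h
    cases l with
    | nil => simp [PySem.Chars.replace.go, pvSc]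
    | cons c t =>
      rw [PySem.Chars.replace.go]
      by_cases hp : List.isPrefixOf [a, b] (c :: t) = true
      · cases t with
        | nil => simp [List.isPrefixOf] at hp
        | cons c2 t' =>
          obtain ⟨rfl, rfl⟩ : a = c ∧ b = c2 := by simpa [List.isPrefixOf] using hp
          simp only [hp, if_true]
          have ht : t'.length ≤ n := by simp only [List.length_cons] at h; omega
          rw [show List.drop (List.length [a, b]) (a :: b :: t') = t' by simp]
          rw [ih t' (r.reverse ++ acc) ht, pvSc_match]
          simp
      · simp only [hp]
        have ht : t.length ≤ n := by simp only [List.length_cons] at h; omega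
        rw [ih t (c :: acc) ht]
        have hs : pvSc a b r (c :: t) = c :: pvSc a b r t := by
          cases t with
          | nil => rfl
          | cons c2 t' =>
            refine pvSc_no_match a b c c2 r t' ?_
            rintro ⟨rfl, rfl⟩
            simp [List.isPrefixOf] at hp
        rw [hs]
        simp

theorem pvReplace_eq_sc (a b : Char) (r s : List Char) :
    PySem.Chars.replace s [a, b] r = pvSc a b r s := by
  rw [PySem.Chars.replace]
  simp only [List.isEmpty_cons, Bool.false_eq_true, if_false]
  have h0 : pvSc a b r [] = [] := rfl
  simpa [h0] using pvReplaceGo_eq a b r s.length s [] le_rfl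

-- shape hypothesis on a rule list: every key has two chars, starts with a char ≠ b,
-- and is not the new key [a, b]
abbrev pvShape (a b : Char) (R : List (List Char × List Char)) : Prop :=
  ∀ p ∈ R, p.1.length = 2 ∧ p.1.headI ≠ b ∧ p.1 ≠ [a, b]

-- replacement hypothesis: every replacement is nonempty, avoids a, and starts with a char ≠ b
abbrev pvReps (a b : Char) (R : List (List Char × List Char)) : Prop :=
  ∀ p ∈ R, p.2 ≠ [] ∧ a ∉ p.2 ∧ p.2.headI ≠ b

theorem pvLookup_single_none (a b c : Char) (R : List (List Char × List Char))
    (hs : pvShape a b R) : List.lookup [c] R = none := by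
  induction R with
  | nil => rfl
  | cons p R ih =>
    obtain ⟨hlen, -, -⟩ := hs p (by simp)
    have hne : ([c] ≠ p.1) := by
      intro hEq; rw [← hEq] at hlen; simp at hlen
    have hb : ([c] == p.1) = false := beq_eq_false_iff_ne.mpr hne
    simp only [List.lookup, hb]
    exact ih (fun q hq => hs q (by simp [hq]))

theorem pvLookup_headb_none (a b d : Char) (R : List (List Char × List Char))
    (hs : pvShape a b R) : List.lookup [b, d] R = none := by
  induction R with
  | nil => rfl
  | cons p R ih =>
    obtain ⟨-, hhd, -⟩ := hs p (by simp)
    have hne : ([b, d] ≠ p.1) := by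
      intro hEq; rw [← hEq] at hhd; simp at hhd
    have hb : ([b, d] == p.1) = false := beq_eq_false_iff_ne.mpr hne
    simp only [List.lookup, hb]
    exact ih (fun q hq => hs q (by simp [hq]))

theorem pvLookup_some_mem {v k : List Char} {R : List (List Char × List Char)}
    (h : List.lookup k R = some v) : ∃ p ∈ R, p.2 = v := by
  induction R with
  | nil => simp [List.lookup] at h
  | cons p R ih =>
    by_cases hk : (k == p.1) = true
    · simp only [List.lookup, hk] at h
      exact ⟨p, by simp, by simpa using h⟩
    · rw [Bool.not_eq_true] at hk
      simp only [List.lookup, hk] at h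
      obtain ⟨q, hq, hv⟩ := ih h
      exact ⟨q, by simp [hq], hv⟩

theorem pvLookup_append (k : List Char) (R S : List (List Char × List Char)) :
    List.lookup k (R ++ S) =
      match List.lookup k R with
      | some v => some v
      | none => List.lookup k S := by
  induction R with
  | nil => simp [List.lookup]
  | cons p R ih =>
    by_cases hk : (k == p.1) = true
    · simp [List.lookup, hk]
    · rw [Bool.not_eq_true] at hk
      simp [List.lookup, hk, ih]

-- the scanner's output on a nonempty input is nonempty and starts either with the
-- input's first char or with the first char of one of the replacements
theorem pvScan_head (R : List (List Char × List Char)) (a b : Char)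
    (hs : pvShape a b R) (hr : pvReps a b R) (c : Char) (y : List Char) (hc : c ≠ b) :
    ∃ h w, pvScan R (c :: y) = h :: w ∧ h ≠ b := by
  cases y with
  | nil =>
    rw [show pvScan R [c] = match List.lookup [c] R with
          | some v => v | none => [c] from rfl]
    rw [pvLookup_single_none a b c R hs]
    exact ⟨c, [], rfl, hc⟩
  | cons d t =>
    rw [show pvScan R (c :: d :: t) = match List.lookup [c, d] R with
          | some v => v ++ pvScan R t | none => c :: pvScan R (d :: t) from rfl]
    cases hl : List.lookup [c, d] R with
    | none => exact ⟨c, pvScan R (d :: t), rfl, hc⟩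
    | some v =>
      obtain ⟨p, hp, hv⟩ := pvLookup_some_mem hl
      obtain ⟨hne, -, hhd⟩ := hr p hp
      rw [hv] at hne hhd
      cases v with
      | nil => exact absurd rfl hne
      | cons h w => exact ⟨h, w ++ pvScan R t, rfl, by simpa using hhd⟩

theorem pvScan_nil_rules (cs : List Char) : pvScan [] cs = cs := by
  induction cs with
  | nil => rfl
  | cons c t ih =>
    cases t with
    | nil => rfl
    | cons d t' => simpa [pvScan, List.lookup] using ih

-- FUSION: running one more `replace` pass over the scanner for rule list R is the
-- scanner for R extended with the new rule
theorem pvFuse (a b : Char) (r : List Char) (R : List (List Char × List Char))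
    (hs : pvShape a b R) (hr : pvReps a b R) :
    ∀ (n : Nat) (cs : List Char), cs.length ≤ n →
      pvSc a b r (pvScan R cs) = pvScan (R ++ [([a, b], r)]) cs := by
  intro n
  induction n with
  | zero =>
    intro cs h
    have : cs = [] := List.eq_nil_of_length_eq_zero (Nat.le_zero.mp h)
    subst this; rfl
  | succ n ih =>
    intro cs h
    match cs with
    | [] => rfl
    | [c] =>
      rw [show pvScan R [c] = match List.lookup [c] R with
            | some v => v | none => [c] from rfl,
          show pvScan (R ++ [([a, b], r)]) [c] =
            match List.lookup [c] (R ++ [([a, b], r)]) with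
            | some v => v | none => [c] from rfl]
      rw [pvLookup_single_none a b c R hs, pvLookup_append,
          pvLookup_single_none a b c R hs]
      have hb : (([c] : List Char) == [a, b]) = false := by
        apply beq_eq_false_iff_ne.mpr; intro hEq; simp at hEq
      simp [List.lookup, hb, pvSc]
    | c1 :: c2 :: t =>
      have ht : t.length ≤ n := by simp only [List.length_cons] at h; omega
      have ht2 : (c2 :: t).length ≤ n := by simp only [List.length_cons] at h ⊢; omega
      rw [show pvScan R (c1 :: c2 :: t) = match List.lookup [c1, c2] R with
            | some v => v ++ pvScan R t | none => c1 :: pvScan R (c2 :: t) from rfl,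
          show pvScan (R ++ [([a, b], r)]) (c1 :: c2 :: t) =
            match List.lookup [c1, c2] (R ++ [([a, b], r)]) with
            | some v => v ++ pvScan (R ++ [([a, b], r)]) t
            | none => c1 :: pvScan (R ++ [([a, b], r)]) (c2 :: t) from rfl,
          pvLookup_append]
      cases hl : List.lookup [c1, c2] R with
      | some v =>
        obtain ⟨p, hp, hv⟩ := pvLookup_some_mem hl
        obtain ⟨-, hna, -⟩ := hr p hp
        rw [hv] at hna
        rw [pvSc_append_not_mem a b r v (pvScan R t) hna, ih t ht]
      | none =>
        by_cases hm : c1 = a ∧ c2 = b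
        · obtain ⟨rfl, rfl⟩ := hm
          have hb : pvScan R (c2 :: t) = c2 :: pvScan R t := by
            cases t with
            | nil =>
              rw [show pvScan R [c2] = match List.lookup [c2] R with
                    | some v => v | none => [c2] from rfl,
                  pvLookup_single_none c1 c2 c2 R hs]
              rfl
            | cons d t' =>
              rw [show pvScan R (c2 :: d :: t') = match List.lookup [c2, d] R with
                    | some v => v ++ pvScan R t' | none => c2 :: pvScan R (d :: t') from rfl,
                  pvLookup_headb_none c1 c2 d R hs]
          rw [hb, pvSc_match, ih t ht]
          simp [List.lookup]
        · have hstep : pvSc a b r (c1 :: pvScan R (c2 :: t)) =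
              c1 :: pvSc a b r (pvScan R (c2 :: t)) := by
            by_cases hc1 : c1 = a
            · subst hc1
              have hc2 : c2 ≠ b := fun hEq => hm ⟨rfl, hEq⟩
              obtain ⟨hd, w, hw, hdb⟩ := pvScan_head R c1 b hs hr c2 t hc2
              rw [hw]
              exact pvSc_no_match c1 b c1 hd r w (fun hEq => hdb hEq.2)
            · exact pvSc_cons_ne a b c1 r _ hc1
          rw [hstep, ih (c2 :: t) ht2]
          have hne : (([c1, c2] : List Char) == [a, b]) = false := by
            apply beq_eq_false_iff_ne.mpr
            intro hEq
            simp only [List.cons.injEq, and_true] at hEq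
            exact hm hEq
          simp [List.lookup, hne]

-- five fusions: A's five sequential passes equal B's one-pass scan over all five rules
theorem pvScan_emoRules (cs : List Char) :
    pvSc ';' ')' (pvEmoRules[4].2)
      (pvSc ':' 'D' (pvEmoRules[3].2)
        (pvSc '<' '3' (pvEmoRules[2].2)
          (pvSc ':' '(' (pvEmoRules[1].2)
            (pvSc ':' ')' (pvEmoRules[0].2) cs)))) = pvScan pvEmoRules cs := by
  have h0 : pvSc ':' ')' (pvEmoRules[0].2) cs = pvScan (pvEmoRules.take 1) cs := by
    conv_lhs => rw [show cs = pvScan [] cs from (pvScan_nil_rules cs).symm]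
    exact pvFuse ':' ')' _ [] (by decide) (by decide) cs.length cs le_rfl
  have h1 : pvSc ':' '(' (pvEmoRules[1].2) (pvScan (pvEmoRules.take 1) cs) =
      pvScan (pvEmoRules.take 2) cs :=
    pvFuse ':' '(' _ (pvEmoRules.take 1) (by decide) (by decide) cs.length cs le_rfl
  have h2 : pvSc '<' '3' (pvEmoRules[2].2) (pvScan (pvEmoRules.take 2) cs) =
      pvScan (pvEmoRules.take 3) cs :=
    pvFuse '<' '3' _ (pvEmoRules.take 2) (by decide) (by decide) cs.length cs le_rfl
  have h3 : pvSc ':' 'D' (pvEmoRules[3].2) (pvScan (pvEmoRules.take 3) cs) =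
      pvScan (pvEmoRules.take 4) cs :=
    pvFuse ':' 'D' _ (pvEmoRules.take 3) (by decide) (by decide) cs.length cs le_rfl
  have h4 : pvSc ';' ')' (pvEmoRules[4].2) (pvScan (pvEmoRules.take 4) cs) =
      pvScan pvEmoRules cs :=
    pvFuse ';' ')' _ (pvEmoRules.take 4) (by decide) (by decide) cs.length cs le_rfl
  rw [h0, h1, h2, h3, h4]

-- ===== VERDICT (by name: the statement is the Claim_ definition above) =====
theorem replace_emoticons_py_spec : Claim_equal_replace_emoticons_py := by
  intro text _
  unfold Spec_replace_emoticons_py replace_emoticons_py replace_emoticons_py_alt pvReplA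
  rw [← String.toList_inj, String.toList_ofList]
  simp only [List.foldl]
  rw [PySem.Str.toList_replace, PySem.Str.toList_replace, PySem.Str.toList_replace,
      PySem.Str.toList_replace, PySem.Str.toList_replace]
  rw [show (";)" : String).toList = [';', ')'] from rfl,
      show (":D" : String).toList = [':', 'D'] from rfl,
      show ("<3" : String).toList = ['<', '3'] from rfl,
      show (":(" : String).toList = [':', '('] from rfl,
      show (":)" : String).toList = [':', ')'] from rfl]
  rw [pvReplace_eq_sc, pvReplace_eq_sc, pvReplace_eq_sc, pvReplace_eq_sc, pvReplace_eq_sc]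
  rw [show ("smiling face" : String).toList = pvEmoRules[0].2 from rfl,
      show ("sad face" : String).toList = pvEmoRules[1].2 from rfl,
      show ("heart" : String).toList = pvEmoRules[2].2 from rfl,
      show ("big smile" : String).toList = pvEmoRules[3].2 from rfl,
      show ("winking face" : String).toList = pvEmoRules[4].2 from rfl]
  exact pvScan_emoRules text.toList
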